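-- pv_equiv track=rewrite | github.com/bills1912/SMART-SE26-Agentic-AI | backend/dsstar_agents.py | _extract_sectors
-- ===== SOURCE A (Python) =====
-- from typing import Dict, Any, List, Optional, Tuple
--
-- def _extract_sectors(query: str) -> List[str]:
--     """Extract sector codes from query"""
--     query_lower = query.lower()
--     found = []
--
--     sector_keywords = {
--         'pertanian': 'A', 'kehutanan': 'A', 'perikanan': 'A',
--         'pertambangan': 'B', 'tambang': 'B',
--         'industri': 'C', 'manufaktur': 'C', 'pengolahan': 'C',
--         'listrik': 'D', 'gas': 'D', 'energi': 'D',
--         'air': 'E', 'limbah': 'E', 'sampah': 'E',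
--         'konstruksi': 'F', 'bangunan': 'F',
--         'perdagangan': 'G', 'retail': 'G', 'eceran': 'G', 'dagang': 'G',
--         'transportasi': 'H', 'logistik': 'H',
--         'hotel': 'I', 'restoran': 'I', 'akomodasi': 'I', 'kuliner': 'I',
--         'informasi': 'J', 'komunikasi': 'J', 'it': 'J',
--         'keuangan': 'K', 'bank': 'K', 'asuransi': 'K',
--         'real estat': 'L', 'properti': 'L',
--         'profesional': 'M', 'konsultan': 'M',
--         'persewaan': 'N', 'travel': 'N',
--         'pemerintah': 'O', 'administrasi': 'O',
--         'pendidikan': 'P', 'sekolah': 'P',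
--         'kesehatan': 'Q', 'rumah sakit': 'Q', 'klinik': 'Q',
--         'hiburan': 'R', 'rekreasi': 'R', 'seni': 'R',
--         'jasa lainnya': 'S'
--     }
--
--     for keyword, code in sector_keywords.items():
--         if keyword in query_lower and code not in found:
--             found.append(code)
--
--     return found
-- ===== SOURCE B (Python) =====
-- from typing import List
--
-- _CODE_KEYWORDS = {
--     'A': ['pertanian', 'kehutanan', 'perikanan'],
--     'B': ['pertambangan', 'tambang'],
--     'C': ['industri', 'manufaktur', 'pengolahan'],
--     'D': ['listrik', 'gas', 'energi'],
--     'E': ['air', 'limbah', 'sampah'],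
--     'F': ['konstruksi', 'bangunan'],
--     'G': ['perdagangan', 'retail', 'eceran', 'dagang'],
--     'H': ['transportasi', 'logistik'],
--     'I': ['hotel', 'restoran', 'akomodasi', 'kuliner'],
--     'J': ['informasi', 'komunikasi', 'it'],
--     'K': ['keuangan', 'bank', 'asuransi'],
--     'L': ['real estat', 'properti'],
--     'M': ['profesional', 'konsultan'],
--     'N': ['persewaan', 'travel'],
--     'O': ['pemerintah', 'administrasi'],
--     'P': ['pendidikan', 'sekolah'],
--     'Q': ['kesehatan', 'rumah sakit', 'klinik'],
--     'R': ['hiburan', 'rekreasi', 'seni'],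
--     'S': ['jasa lainnya'],
-- }
--
-- def _extract_sectors(query: str) -> List[str]:
--     """Extract sector codes from query"""
--     query_lower = query.lower()
--     return [code for code, keywords in _CODE_KEYWORDS.items()
--             if any(kw in query_lower for kw in keywords)]
-- ===== Notes on version B (the rewrite author's own statement) =====
-- stated objective: simpler
-- what changed: B inverts the flat keyword-to-code dict into a code-to-keywords map (codes in first-appearance order) and builds the result in one comprehension with any(), eliminating the per-append membership-dedup scan that A performs on its growing result list.
import Mathlib
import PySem

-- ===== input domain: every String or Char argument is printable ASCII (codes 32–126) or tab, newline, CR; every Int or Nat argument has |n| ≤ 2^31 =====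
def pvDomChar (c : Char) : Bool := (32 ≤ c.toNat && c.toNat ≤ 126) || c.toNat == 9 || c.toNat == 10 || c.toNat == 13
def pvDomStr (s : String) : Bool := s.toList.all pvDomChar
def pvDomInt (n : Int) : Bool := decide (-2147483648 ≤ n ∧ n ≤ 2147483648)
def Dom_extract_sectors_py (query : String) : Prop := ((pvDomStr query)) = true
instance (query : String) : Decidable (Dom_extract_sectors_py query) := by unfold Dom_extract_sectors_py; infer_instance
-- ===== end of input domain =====

-- B replaces A's flat keyword→code scan with a per-append dedup check by one pass over an
-- inverted code→keywords map with any(); objective: simpler.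

-- ===== PORT A =====
-- the sector_keywords dict of A, in insertion order (keyword, code)
def sectorKeywordsA : List (String × String) :=
  [("pertanian","A"), ("kehutanan","A"), ("perikanan","A"),
   ("pertambangan","B"), ("tambang","B"),
   ("industri","C"), ("manufaktur","C"), ("pengolahan","C"),
   ("listrik","D"), ("gas","D"), ("energi","D"),
   ("air","E"), ("limbah","E"), ("sampah","E"),
   ("konstruksi","F"), ("bangunan","F"),
   ("perdagangan","G"), ("retail","G"), ("eceran","G"), ("dagang","G"),
   ("transportasi","H"), ("logistik","H"),
   ("hotel","I"), ("restoran","I"), ("akomodasi","I"), ("kuliner","I"),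
   ("informasi","J"), ("komunikasi","J"), ("it","J"),
   ("keuangan","K"), ("bank","K"), ("asuransi","K"),
   ("real estat","L"), ("properti","L"),
   ("profesional","M"), ("konsultan","M"),
   ("persewaan","N"), ("travel","N"),
   ("pemerintah","O"), ("administrasi","O"),
   ("pendidikan","P"), ("sekolah","P"),
   ("kesehatan","Q"), ("rumah sakit","Q"), ("klinik","Q"),
   ("hiburan","R"), ("rekreasi","R"), ("seni","R"),
   ("jasa lainnya","S")]

-- for keyword, code in sector_keywords.items(): if keyword in query_lower and code not in found: found.append(code)
def extract_sectors_py (query : String) : List String :=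
  let query_lower := PySem.Str.lower query
  sectorKeywordsA.foldl
    (fun found kc =>
      if PySem.Str.isIn kc.1 query_lower && !(found.contains kc.2) then found ++ [kc.2] else found)
    []

-- ===== PORT B =====
-- B's inverted dict: code → its keywords, codes in first-appearance order
def codeKeywordsB : List (String × List String) :=
  [("A", ["pertanian","kehutanan","perikanan"]),
   ("B", ["pertambangan","tambang"]),
   ("C", ["industri","manufaktur","pengolahan"]),
   ("D", ["listrik","gas","energi"]),
   ("E", ["air","limbah","sampah"]),
   ("F", ["konstruksi","bangunan"]),
   ("G", ["perdagangan","retail","eceran","dagang"]),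
   ("H", ["transportasi","logistik"]),
   ("I", ["hotel","restoran","akomodasi","kuliner"]),
   ("J", ["informasi","komunikasi","it"]),
   ("K", ["keuangan","bank","asuransi"]),
   ("L", ["real estat","properti"]),
   ("M", ["profesional","konsultan"]),
   ("N", ["persewaan","travel"]),
   ("O", ["pemerintah","administrasi"]),
   ("P", ["pendidikan","sekolah"]),
   ("Q", ["kesehatan","rumah sakit","klinik"]),
   ("R", ["hiburan","rekreasi","seni"]),
   ("S", ["jasa lainnya"])]

-- [code for code, keywords in _CODE_KEYWORDS.items() if any(kw in query_lower for kw in keywords)]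
def extract_sectors_py_alt (query : String) : List String :=
  let query_lower := PySem.Str.lower query
  (codeKeywordsB.filter (fun ck => ck.2.any (fun kw => PySem.Str.isIn kw query_lower))).map Prod.fst

-- ===== PRECONDITION & SPEC =====
def Spec_extract_sectors_py (query : String) (out : List String) : Prop := out = extract_sectors_py_alt query
instance (query : String) (out : List String) : Decidable (Spec_extract_sectors_py query out) := by unfold Spec_extract_sectors_py; infer_instance

-- ===== CLAIM (what is proved, stated in full; the proofs are below) =====
def Claim_equal_extract_sectors_py : Prop := ∀ (query : String), Dom_extract_sectors_py query → Spec_extract_sectors_py query (extract_sectors_py query)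

-- ===== LEMMAS AND PROOFS =====

-- A's loop body as a named step function (with the lowered query fixed)
def stepA (ql : String) (found : List String) (kc : String × String) : List String :=
  if PySem.Str.isIn kc.1 ql && !(found.contains kc.2) then found ++ [kc.2] else found

-- once the code is in found, the rest of its group changes nothing
theorem foldA_group_mem (ql : String) (c : String) :
    ∀ (kws : List String) (found : List String), found.contains c = true →
    (kws.map (fun k => (k, c))).foldl (stepA ql) found = found := by
  intro kws
  induction kws with
  | nil => intro found _; rfl
  | cons k t ih =>
    intro found h
    simp only [List.map_cons, List.foldl_cons, stepA, h, Bool.not_true, Bool.and_false,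
      if_neg Bool.false_ne_true]
    exact ih found h

-- a whole same-code group appends its code iff some keyword matches
theorem foldA_group (ql : String) (c : String) :
    ∀ (kws : List String) (found : List String), found.contains c = false →
    (kws.map (fun k => (k, c))).foldl (stepA ql) found =
      (if kws.any (fun k => PySem.Str.isIn k ql) then found ++ [c] else found) := by
  intro kws
  induction kws with
  | nil => intro found _; rfl
  | cons k t ih =>
    intro found h
    simp only [List.map_cons, List.foldl_cons, List.any_cons]
    by_cases hk : PySem.Str.isIn k ql = true
    · have hc : (found ++ [c]).contains c = true := by
        simp
      simp only [stepA, hk, h, Bool.not_false, Bool.and_true, Bool.true_or]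
      exact foldA_group_mem ql c t (found ++ [c]) hc
    · have hk' : PySem.Str.isIn k ql = false := by simpa using hk
      simp only [stepA, hk', Bool.false_and, if_neg Bool.false_ne_true, Bool.false_or]
      exact ih found h

-- folding A's step over the concatenation of the groups = B's filter-map,
-- provided codes are fresh w.r.t. found and pairwise distinct
theorem foldA_groups (ql : String) :
    ∀ (gs : List (String × List String)) (found : List String),
    (∀ c ∈ gs.map Prod.fst, found.contains c = false) → (gs.map Prod.fst).Nodup →
    (gs.flatMap (fun g => g.2.map (fun k => (k, g.1)))).foldl (stepA ql) found =
      found ++ (gs.filter (fun g => g.2.any (fun kw => PySem.Str.isIn kw ql))).map Prod.fst := by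
  intro gs
  induction gs with
  | nil => intro found _ _; simp
  | cons g t ih =>
    intro found hfresh hnodup
    obtain ⟨c, kws⟩ := g
    simp only [List.map_cons] at hfresh hnodup
    have hc : found.contains c = false := hfresh c (by simp)
    simp only [List.flatMap_cons, List.foldl_append, foldA_group ql c kws found hc,
      List.filter_cons]
    by_cases hm : kws.any (fun kw => PySem.Str.isIn kw ql) = true
    · have hfresh' : ∀ c' ∈ t.map Prod.fst, (found ++ [c]).contains c' = false := by
        intro c' hc'
        have h1 : found.contains c' = false := hfresh c' (by simp [hc'])
        have h2 : c' ≠ c := fun he => (List.nodup_cons.mp hnodup).1 (he ▸ hc')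
        simp_all
      rw [if_pos hm, if_pos hm, ih (found ++ [c]) hfresh' (List.nodup_cons.mp hnodup).2]
      simp
    · rw [if_neg hm, if_neg hm]
      exact ih found (fun c' hc' => hfresh c' (List.mem_cons_of_mem _ hc'))
        (List.nodup_cons.mp hnodup).2

-- A's flat keyword list is exactly the concatenation of B's groups
theorem kwList_eq :
    sectorKeywordsA = codeKeywordsB.flatMap (fun g => g.2.map (fun k => (k, g.1))) := by
  rfl

-- ===== VERDICT (by name: the statement is the Claim_ definition above) =====
theorem extract_sectors_py_spec : Claim_equal_extract_sectors_py := by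
  intro query _
  show extract_sectors_py query = extract_sectors_py_alt query
  show sectorKeywordsA.foldl (stepA (PySem.Str.lower query)) [] =
    (codeKeywordsB.filter
      (fun ck => ck.2.any (fun kw => PySem.Str.isIn kw (PySem.Str.lower query)))).map Prod.fst
  rw [kwList_eq, foldA_groups (PySem.Str.lower query) codeKeywordsB [] (by simp) (by decide)]
  simp
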